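-- pv_equiv track=rewrite | github.com/mahdieslaminet/Telecommunications-networks | week 7/crc_with_extended_hamming.py | insert_parity_positions
-- ===== SOURCE A (Python) =====
-- def calc_r_for_k(k):
--     r = 1
--     while 2**r < (k + r + 1):
--         r += 1
--     return r
--
-- def insert_parity_positions(data_bits):
--     k = len(data_bits)
--     r = calc_r_for_k(k)
--     n = k + r + 1  # +1 for overall parity
--     code = [None] * n
--     # place data bits into codeword (1-indexed positions)
--     j = 0
--     for i in range(1, n+1):
--         if (i & (i-1)) == 0:  # power of two -> parity position
--             code[i-1] = 0
--         else:
--             code[i-1] = data_bits[j]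
--             j += 1
--     return code, r
-- ===== SOURCE B (Python) =====
-- def calc_r_for_k(k):
--     r = 1
--     while 2**r < (k + r + 1):
--         r += 1
--     return r
--
-- def insert_parity_positions(data_bits):
--     # Block construction: between consecutive powers of two 2**t and 2**(t+1)
--     # lie exactly 2**t - 1 data positions, so the codeword is a concatenation
--     # of blocks [parity 0] + (next 2**t - 1 data bits) for t = 0..r-1, closed
--     # by the final parity slot at position 2**r; no per-position power-of-two
--     # test is needed.
--     r = calc_r_for_k(len(data_bits))
--     bits = iter(data_bits)
--     code = []
--     for t in range(r):
--         code.append(0)              # parity slot at position 2**t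
--         for _ in range(2**t - 1):
--             code.append(next(bits))
--     code.append(0)                  # overall parity slot at position 2**r
--     return code, r
-- ===== Notes on version B (the rewrite author's own statement) =====
-- stated objective: alternative
-- what changed: A scans all n codeword positions testing each with i&(i-1) to decide parity-vs-data and tracks a running data index; B never tests bits at all: it emits the codeword as r blocks, each a parity zero followed by the next 2**t-1 bits pulled from an iterator, plus the closing overall-parity zero, exploiting that between consecutive powers of two lie exactly 2**t-1 data slots.
import Mathlib
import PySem

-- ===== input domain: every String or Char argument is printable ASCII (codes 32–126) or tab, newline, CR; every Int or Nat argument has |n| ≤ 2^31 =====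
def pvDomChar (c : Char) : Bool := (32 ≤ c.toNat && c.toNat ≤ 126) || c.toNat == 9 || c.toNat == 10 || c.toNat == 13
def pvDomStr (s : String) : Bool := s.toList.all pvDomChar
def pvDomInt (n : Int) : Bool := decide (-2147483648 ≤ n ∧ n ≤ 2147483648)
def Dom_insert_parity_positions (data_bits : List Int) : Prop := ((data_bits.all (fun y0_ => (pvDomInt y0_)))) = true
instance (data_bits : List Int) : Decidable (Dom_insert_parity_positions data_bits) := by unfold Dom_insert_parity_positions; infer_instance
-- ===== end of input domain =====

-- B abandons A's scan of all n positions with a per-position i&(i-1) parity test and a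
-- running data index: it emits the codeword as r blocks, each a parity zero followed by
-- the next 2^t-1 data bits pulled from an iterator, plus the closing overall-parity
-- zero; objective: alternative.

-- ===== PORT A =====
-- while 2**r < (k + r + 1): r += 1  — fuel k.toNat+1 suffices: the loop stops at the least
-- r ≥ 1 with 2^r ≥ k+r+1, which is at most k+1.  r stays ≥ 1, so 2 ** r = 2 ^ r.toNat exactly.
def calcRLoop (k : Int) : Nat → Int → Int
  | 0, r => r
  | f + 1, r => if 2 ^ r.toNat < k + r + 1 then calcRLoop k f (r + 1) else r

def calc_r_for_k (k : Int) : Int := calcRLoop k (k.toNat + 1) 1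

-- loop body of A: 'if (i & (i-1)) == 0: code[i-1] = 0 else: code[i-1] = data_bits[j]; j += 1';
-- state = (code, j).  Python's [None]*n is modelled as replicate n 0 (under Pre_ every slot is
-- written before being read); data_bits[j] is pyGet?, whose getD 0 is only reached where
-- Python raises IndexError (outside Pre_).
def stepA (data_bits : List Int) (st : List Int × Int) (i : Int) : List Int × Int :=
  if PySem.Int.band i (i - 1) == 0 then
    (st.1.set (i - 1).toNat 0, st.2)
  else
    (st.1.set (i - 1).toNat ((PySem.List.pyGet? data_bits st.2).getD 0), st.2 + 1)

def insert_parity_positions (data_bits : List Int) : List Int × Int :=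
  let k : Int := data_bits.length
  let r : Int := calc_r_for_k k
  let n : Int := k + r + 1
  let st := (PySem.List.pyRange 1 (n + 1)).foldl (stepA data_bits)
    (List.replicate n.toNat (0 : Int), (0 : Int))
  (st.1, r)

-- ===== PORT B =====
-- inner loop 'for _ in range(2**t - 1): code.append(next(bits))'; the iterator over
-- data_bits is the pair (consumed count); next(bits) is pyGet?, whose getD 0 is only
-- reached where Python raises StopIteration (outside Pre_).
def innerB (data_bits : List Int) : Nat → List Int × Int → List Int × Int
  | 0, st => st
  | c + 1, st =>
      innerB data_bits c (st.1 ++ [(PySem.List.pyGet? data_bits st.2).getD 0], st.2 + 1)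

-- outer loop body for t in range(r): append the parity 0, then the next 2**t - 1 bits
def stepB (data_bits : List Int) (st : List Int × Int) (t : Int) : List Int × Int :=
  innerB data_bits (2 ^ t.toNat - 1) (st.1 ++ [0], st.2)

def insert_parity_positions_alt (data_bits : List Int) : List Int × Int :=
  let r : Int := calc_r_for_k data_bits.length
  let st := (PySem.List.pyRange 0 r).foldl (stepB data_bits) ([], 0)
  (st.1 ++ [0], r)

-- ===== PRECONDITION & SPEC =====
-- Pre_ excludes exactly the lengths k on which A raises IndexError: unless some m satisfies
-- 2^m = k + m + 1 (k = 0, 1, 4, 11, 26, ...), the codeword has more data slots than data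
-- bits, so A's data_bits[j] goes out of range.
def Pre_insert_parity_positions (data_bits : List Int) : Prop :=
  ∃ m : Nat, m ≤ data_bits.length + 1 ∧ 2 ^ m = data_bits.length + m + 1

instance (data_bits : List Int) : Decidable (Pre_insert_parity_positions data_bits) := by
  unfold Pre_insert_parity_positions; infer_instance

def pvWitness_insert_parity_positions : List Int := [1]

def Spec_insert_parity_positions (data_bits : List Int) (out : List Int × Int) : Prop :=
  out = insert_parity_positions_alt data_bits
instance (data_bits : List Int) (out : List Int × Int) :
    Decidable (Spec_insert_parity_positions data_bits out) := by
  unfold Spec_insert_parity_positions; infer_instance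

-- ===== CLAIM (what is proved, stated in full; the proofs are below) =====
def Claim_equal_insert_parity_positions : Prop := ∀ (data_bits : List Int),
  Dom_insert_parity_positions data_bits → Pre_insert_parity_positions data_bits →
  Spec_insert_parity_positions data_bits (insert_parity_positions data_bits)

-- ===== LEMMAS AND PROOFS =====

-- p & (p-1) == 0 tests 'power of two' (Nat level)
theorem land_pred_eq_zero : ∀ p : Nat, 1 ≤ p → (p &&& (p-1) = 0 ↔ ∃ m : Nat, p = 2^m) := by
  intro p
  induction p using Nat.strong_induction_on with
  | _ p ih =>
    intro hp
    rcases Nat.even_or_odd p with ⟨a, ha⟩ | ⟨a, ha⟩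
    · have ha2 : p = 2*a := by omega
      have ha1 : 1 ≤ a := by omega
      have hb : p = Nat.bit false a := by simp [Nat.bit]; omega
      have hb' : p - 1 = Nat.bit true (a-1) := by simp [Nat.bit]; omega
      rw [hb', hb, Nat.land_bit]
      have heq0 : Nat.bit (false && true) (a &&& (a-1)) = 2*(a &&& (a-1)) := by simp [Nat.bit]
      rw [heq0]
      constructor
      · intro h
        have h0 : a &&& (a-1) = 0 := by omega
        obtain ⟨m, hm⟩ := (ih a (by omega) ha1).mp h0
        have hbv : Nat.bit false a = 2*a := by simp [Nat.bit]
        exact ⟨m+1, by rw [hbv, hm]; ring⟩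
      · rintro ⟨m, hm⟩
        match m with
        | 0 => omega
        | m+1 =>
          have hbv : Nat.bit false a = 2*a := by simp [Nat.bit]
          have : a = 2^m := by rw [hbv] at hm; rw [pow_succ] at hm; omega
          have := (ih a (by omega) ha1).mpr ⟨m, this⟩
          omega
    · have ha2 : p = 2*a+1 := by omega
      by_cases h1 : p = 1
      · subst h1; constructor
        · intro; exact ⟨0, rfl⟩
        · intro; decide
      · have ha1 : 1 ≤ a := by omega
        have hb : p = Nat.bit true a := by simp [Nat.bit]; omega
        have hb' : p - 1 = Nat.bit false a := by simp [Nat.bit]; omega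
        rw [hb', hb, Nat.land_bit]
        have heq : Nat.bit (true && false) (a &&& a) = 2*a := by simp [Nat.bit]
        rw [heq]
        constructor
        · intro h; omega
        · rintro ⟨m, hm⟩
          exfalso
          match m with
          | 0 => omega
          | m+1 => rw [pow_succ] at hm; omega

-- bridge to the Int-level test the ports run
theorem band_test_iff (i : Int) (hi : 1 ≤ i) :
    ((PySem.Int.band i (i - 1) == 0) = true ↔ ∃ m : Nat, i = 2 ^ m) := by
  obtain ⟨p, rfl⟩ : ∃ p : Nat, i = (p : Int) := ⟨i.toNat, by omega⟩
  have hp : 1 ≤ p := by exact_mod_cast hi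
  have h1 : (p : Int) - 1 = ((p - 1 : Nat) : Int) := by omega
  rw [h1, PySem.Int.band_natCast]
  constructor
  · intro h
    have h0 : p &&& (p - 1) = 0 := by
      have := of_decide_eq_true (by simpa using h)
      exact_mod_cast this
    obtain ⟨m, hm⟩ := (land_pred_eq_zero p hp).mp h0
    exact ⟨m, by rw [hm]; push_cast; ring⟩
  · rintro ⟨m, hm⟩
    have hpm : p = 2 ^ m := by exact_mod_cast hm
    have h0 := (land_pred_eq_zero p hp).mpr ⟨m, hpm⟩
    simp [h0]

-- the parity test at a power of two
theorem band_pow2 (t : Nat) : (PySem.Int.band ((2:Int) ^ t) ((2:Int) ^ t - 1) == 0) = true := by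
  have h1 : (1:Int) ≤ (2:Int) ^ t := one_le_pow₀ (by norm_num)
  exact (band_test_iff _ h1).mpr ⟨t, rfl⟩

-- strictly between consecutive powers of two lies no power of two
theorem band_between (t : Nat) (q : Int) (h1 : (2:Int) ^ t < q) (h2 : q < (2:Int) ^ (t+1)) :
    (PySem.Int.band q (q - 1) == 0) = false := by
  have hq1 : (1:Int) ≤ q := le_trans (one_le_pow₀ (by norm_num) : (1:Int) ≤ 2 ^ t) h1.le
  by_contra h
  have hb : (PySem.Int.band q (q - 1) == 0) = true := by
    cases hx : (PySem.Int.band q (q - 1) == 0) <;> simp_all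
  obtain ⟨m, rfl⟩ := (band_test_iff q hq1).mp hb
  rcases Nat.lt_or_ge t m with hm | hm
  · have : (2:Int) ^ (t+1) ≤ 2 ^ m := by gcongr <;> omega
    omega
  · have : (2:Int) ^ m ≤ 2 ^ t := by gcongr <;> omega
    omega

-- setting position done.length inside done ++ rest edits the head of rest
theorem set_append_len (done rest : List Int) (v : Int) :
    (done ++ rest).set done.length v = done ++ rest.set 0 v := by
  induction done with
  | nil => simp
  | cons x xs ih => simpa using ih

-- A's writes over a run of consecutive data positions copy a contiguous slice of the data
theorem runL (data : List Int) : ∀ (c : Nat) (pos : Int) (j : Nat) (done : List Int) (m : Nat),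
    done.length = (pos - 1).toNat → 1 ≤ pos → c ≤ m → j + c ≤ data.length →
    (∀ q : Int, pos ≤ q → q < pos + (c : Int) → (PySem.Int.band q (q - 1) == 0) = false) →
    (PySem.List.pyRange pos (pos + (c : Int))).foldl (stepA data)
        (done ++ List.replicate m 0, (j : Int))
      = (done ++ (data.drop j).take c ++ List.replicate (m - c) 0, ((j + c : Nat) : Int)) := by
  intro c
  induction c with
  | zero =>
    intro pos j done m hd hpos hcm hjc hnp
    rw [show pos + ((0:Nat):Int) = pos by push_cast; ring,
      PySem.List.pyRange_one_eq_nil le_rfl]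
    simp
  | succ c ih =>
    intro pos j done m hd hpos hcm hjc hnp
    obtain ⟨m', rfl⟩ : ∃ m', m = m' + 1 := ⟨m - 1, by omega⟩
    have hlt : pos < pos + ((c+1 : Nat) : Int) := by push_cast; omega
    rw [PySem.List.pyRange_one_cons hlt, List.foldl_cons]
    have hbp : (PySem.Int.band pos (pos - 1) == 0) = false :=
      hnp pos le_rfl (by push_cast; omega)
    have hj : j < data.length := by omega
    have hget : PySem.List.pyGet? data (j : Int) = some data[j] := by
      rw [PySem.List.pyGet?_natCast]; exact List.getElem?_eq_getElem hj
    have hset : (done ++ List.replicate (m'+1) (0:Int)).set (pos - 1).toNat data[j]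
        = (done ++ [data[j]]) ++ List.replicate m' 0 := by
      rw [← hd, List.replicate_succ, set_append_len]
      simp
    have hcond : ¬((PySem.Int.band pos (pos - 1) == 0) = true) := by simp [hbp]
    have hstep : stepA data (done ++ List.replicate (m'+1) (0:Int), (j : Int)) pos
        = ((done ++ [data[j]]) ++ List.replicate m' 0, ((j+1 : Nat) : Int)) := by
      unfold stepA
      rw [if_neg hcond, hget]
      simp only [Option.getD_some]
      rw [hset]
      congr 1
    rw [hstep]
    have hend : pos + ((c+1 : Nat) : Int) = (pos + 1) + ((c : Nat) : Int) := by
      push_cast; ring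
    rw [hend]
    rw [ih (pos + 1) (j + 1) (done ++ [data[j]]) m'
      (by simp [hd]; omega) (by omega) (by omega) (by omega)
      (fun q hq1 hq2 => hnp q (by omega) (by push_cast at hq2 ⊢; omega))]
    have hms : m' + 1 - (c + 1) = m' - c := by omega
    congr 1
    · rw [List.drop_eq_getElem_cons hj, hms, List.take_succ_cons]
      simp [List.append_assoc]
    · congr 1
      omega

-- B's inner loop pulls the next c bits from the iterator: it appends a contiguous slice
theorem innerB_spec (data : List Int) : ∀ (c : Nat) (code : List Int) (j : Nat),
    j + c ≤ data.length →
    innerB data c (code, (j : Int)) = (code ++ (data.drop j).take c, ((j + c : Nat) : Int)) := by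
  intro c
  induction c with
  | zero => intro code j _; simp [innerB]
  | succ c ih =>
    intro code j hjc
    have hj : j < data.length := by omega
    have hget : PySem.List.pyGet? data (j : Int) = some data[j] := by
      rw [PySem.List.pyGet?_natCast]; exact List.getElem?_eq_getElem hj
    have hstep : innerB data (c + 1) (code, (j : Int))
        = innerB data c (code ++ [data[j]], ((j + 1 : Nat) : Int)) := by
      simp only [innerB, hget, Option.getD_some]
      congr 1
    rw [hstep, ih (code ++ [data[j]]) (j + 1) (by omega)]
    congr 1
    · rw [List.drop_eq_getElem_cons hj, List.take_succ_cons]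
      simp [List.append_assoc]
    · congr 1
      omega

-- block simulation: A's scan from position 2^t on = B's remaining blocks + final parity
theorem blockSim (data : List Int) (r : Nat)
    (hlen : data.length + r + 1 = 2 ^ r) :
    ∀ (c t : Nat) (code : List Int) (j : Nat),
      t + c = r → code.length = 2 ^ t - 1 → j + t = 2 ^ t - 1 →
      ((PySem.List.pyRange ((2:Int) ^ t) ((2:Int) ^ r + 1)).foldl (stepA data)
          (code ++ List.replicate (2 ^ r + 1 - 2 ^ t) 0, (j : Int))).1
        = ((PySem.List.pyRange ((t : Nat) : Int) ((r : Nat) : Int)).foldl (stepB data)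
            (code, (j : Int))).1 ++ [0] := by
  intro c
  induction c with
  | zero =>
    intro t code j htc hcl hjt
    have ht : t = r := by omega
    subst ht
    have h2t : 1 ≤ 2 ^ t := Nat.one_le_two_pow
    have hchunkN : ((2 ^ t - 1 : Nat) : Int) = (2:Int) ^ t - 1 := by
      rw [Nat.cast_sub h2t]; push_cast; ring
    rw [PySem.List.pyRange_one_eq_nil (le_refl ((t : Nat) : Int))]
    have hm : 2 ^ t + 1 - 2 ^ t = 1 := by omega
    rw [hm]
    rw [PySem.List.pyRange_one_cons (by omega : (2:Int) ^ t < (2:Int) ^ t + 1),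
      List.foldl_cons]
    have hparity : stepA data (code ++ List.replicate 1 (0:Int), (j : Int)) ((2:Int) ^ t)
        = (code ++ [0], (j : Int)) := by
      simp only [stepA, band_pow2 t, if_pos]
      rw [show ((2:Int) ^ t - 1).toNat = code.length by
            rw [← hchunkN, Int.toNat_natCast, hcl]]
      rw [List.replicate_succ, set_append_len]
      simp
    rw [hparity]
    rw [PySem.List.pyRange_one_eq_nil (by omega : (2:Int) ^ t + 1 ≤ (2:Int) ^ t + 1)]
    simp
  | succ c ih =>
    intro t code j htc hcl hjt
    have htlt : t < r := by omega
    have ht : t ≤ r := by omega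
    have h2t : 1 ≤ 2 ^ t := Nat.one_le_two_pow
    have h2ti : (1:Int) ≤ (2:Int) ^ t := one_le_pow₀ (by norm_num)
    have h2ri : (1:Int) ≤ (2:Int) ^ r := one_le_pow₀ (by norm_num)
    have h2le : (2:Int) ^ t ≤ (2:Int) ^ r := by gcongr <;> omega
    have h2len : (2:Nat) ^ t ≤ 2 ^ r := Nat.pow_le_pow_right (by omega) ht
    -- the leading parity write is a no-op (the slot already holds 0)
    have hm1 : 2 ^ r + 1 - 2 ^ t = (2 ^ r - 2 ^ t) + 1 := by omega
    -- the chunk and its cast forms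
    have hchunkN : ((2 ^ t - 1 : Nat) : Int) = (2:Int) ^ t - 1 := by
      rw [Nat.cast_sub h2t]; push_cast; ring
    have hparity : stepA data (code ++ List.replicate (2 ^ r + 1 - 2 ^ t) (0:Int), (j : Int))
        ((2:Int) ^ t)
        = (code ++ List.replicate (2 ^ r + 1 - 2 ^ t) (0:Int), (j : Int)) := by
      simp only [stepA, band_pow2 t, if_pos]
      rw [show ((2:Int) ^ t - 1).toNat = code.length by
            rw [← hchunkN, Int.toNat_natCast, hcl]]
      rw [hm1, List.replicate_succ, set_append_len]
      simp
    have hjc : j + (2 ^ t - 1) ≤ data.length := by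
      have key : 2 ^ (t+1) + r ≤ 2 ^ r + (t + 1) := by
        rcases Nat.lt_or_ge (t+1) r with h | h
        · have hmono : ∀ (b a : Nat), 1 ≤ a → a < b → 2 ^ a + b < 2 ^ b + a := by
            intro b
            induction b with
            | zero => omega
            | succ b ihb =>
              intro a ha hab
              rcases Nat.lt_or_ge a b with hx | hx
              · have := ihb a ha hx
                have h1 : 2 ^ b + 1 ≤ 2 ^ (b + 1) := by
                  have : 1 ≤ 2 ^ b := Nat.one_le_two_pow
                  rw [Nat.pow_succ]; omega
                omega
              · have hb : a = b := by omega
                subst hb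
                have h2 : 2 ≤ 2 ^ a := by
                  calc 2 = 2 ^ 1 := rfl
                  _ ≤ 2 ^ a := Nat.pow_le_pow_right (by omega) ha
                rw [Nat.pow_succ]; omega
          exact (hmono r (t+1) (by omega) h).le
        · have : t + 1 = r := by omega
          rw [this]
      have hpow : 2 ^ (t+1) = 2 ^ t + 2 ^ t := by rw [Nat.pow_succ]; omega
      omega
    -- split off the whole block [2^t, 2^(t+1))
    have hsplit : PySem.List.pyRange ((2:Int) ^ t) ((2:Int) ^ r + 1)
        = PySem.List.pyRange ((2:Int) ^ t) ((2:Int) ^ (t+1))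
          ++ PySem.List.pyRange ((2:Int) ^ (t+1)) ((2:Int) ^ r + 1) := by
      refine PySem.List.pyRange_one_append _ _ _ ?_ ?_
      · have : (2:Int) ^ t ≤ 2 ^ (t+1) := by gcongr <;> omega
        omega
      · have : (2:Int) ^ (t+1) ≤ 2 ^ r := by gcongr <;> omega
        omega
    rw [hsplit, List.foldl_append]
    have hblockrange : PySem.List.pyRange ((2:Int) ^ t) ((2:Int) ^ (t+1))
        = (2:Int) ^ t :: PySem.List.pyRange ((2:Int) ^ t + 1)
            ((2:Int) ^ t + 1 + ((2 ^ t - 1 : Nat) : Int)) := by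
      rw [show (2:Int) ^ t + 1 + ((2 ^ t - 1 : Nat) : Int) = (2:Int) ^ (t+1) by
            rw [hchunkN]; rw [pow_succ]; ring]
      exact PySem.List.pyRange_one_cons (by
        have : (2:Int) ^ t < 2 ^ (t+1) := by gcongr <;> omega
        exact this)
    rw [hblockrange, List.foldl_cons, hparity]
    -- run of 2^t - 1 data writes
    have hrw : code ++ List.replicate (2 ^ r + 1 - 2 ^ t) (0:Int)
        = (code ++ [0]) ++ List.replicate (2 ^ r - 2 ^ t) 0 := by
      rw [hm1, List.replicate_succ]; simp
    rw [hrw]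
    have hrun := runL data (2 ^ t - 1) ((2:Int) ^ t + 1) j (code ++ [0]) (2 ^ r - 2 ^ t)
      (by simp [hcl]; push_cast; omega) (by omega)
      (by
        have : 2 ^ (t+1) ≤ 2 ^ r := Nat.pow_le_pow_right (by omega) (by omega)
        have : 2 ^ (t+1) = 2 ^ t + 2 ^ t := by rw [Nat.pow_succ]; omega
        omega)
      hjc
      (by
        intro q hq1 hq2
        refine band_between t q (by omega) ?_
        rw [hchunkN] at hq2
        have : (2:Int) ^ (t+1) = 2 ^ t + 2 ^ t := by rw [pow_succ]; ring
        omega)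
    rw [hrun]
    have hm2 : 2 ^ r - 2 ^ t - (2 ^ t - 1) = 2 ^ r + 1 - 2 ^ (t+1) := by
      have : 2 ^ (t+1) = 2 ^ t + 2 ^ t := by rw [Nat.pow_succ]; omega
      have : 2 ^ (t+1) ≤ 2 ^ r := Nat.pow_le_pow_right (by omega) (by omega)
      omega
    rw [hm2]
    -- B's step for block t
    have hcast1 : ((t : Nat) : Int) + 1 = ((t + 1 : Nat) : Int) := by push_cast; ring
    have hBcons : PySem.List.pyRange ((t : Nat) : Int) ((r : Nat) : Int)
        = ((t : Nat) : Int) :: PySem.List.pyRange (((t + 1 : Nat)) : Int) ((r : Nat) : Int) := by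
      rw [← hcast1]
      exact PySem.List.pyRange_one_cons (by exact_mod_cast htlt)
    have hstepB : stepB data (code, (j : Int)) ((t : Nat) : Int)
        = ((code ++ [0]) ++ (data.drop j).take (2 ^ t - 1), ((j + (2 ^ t - 1) : Nat) : Int)) := by
      unfold stepB
      rw [Int.toNat_natCast]
      exact innerB_spec data (2 ^ t - 1) (code ++ [0]) j hjc
    rw [hBcons, List.foldl_cons, hstepB]
    -- recurse on the remaining blocks
    have hchunklen : ((data.drop j).take (2 ^ t - 1)).length = 2 ^ t - 1 := by
      simp; omega
    have hih := ih (t+1) ((code ++ [0]) ++ (data.drop j).take (2 ^ t - 1))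
      (j + (2 ^ t - 1))
      (by omega)
      (by
        simp [hcl, hchunklen]
        have : 2 ^ (t+1) = 2 ^ t + 2 ^ t := by rw [Nat.pow_succ]; omega
        omega)
      (by
        have : 2 ^ (t+1) = 2 ^ t + 2 ^ t := by rw [Nat.pow_succ]; omega
        omega)
    simp only [List.append_assoc] at hih ⊢
    exact hih

-- 2^a - a is strictly monotone from 1 on
theorem pow_sub_mono : ∀ (b a : Nat), 1 ≤ a → a < b → 2 ^ a + b < 2 ^ b + a := by
  intro b
  induction b with
  | zero => omega
  | succ b ih =>
    intro a ha hab
    rcases Nat.lt_or_ge a b with h | h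
    · have := ih a ha h
      have h1 : 2 ^ b + 1 ≤ 2 ^ (b + 1) := by
        have : 1 ≤ 2 ^ b := Nat.one_le_two_pow
        calc 2 ^ b + 1 ≤ 2 ^ b + 2 ^ b := by omega
        _ = 2 ^ (b + 1) := by rw [Nat.pow_succ]; omega
      omega
    · have hb : a = b := by omega
      subst hb
      have : 2 ^ a < 2 ^ (a + 1) := Nat.pow_lt_pow_succ (by omega)
      have : 2 ≤ 2 ^ a := by
        calc 2 = 2 ^ 1 := rfl
        _ ≤ 2 ^ a := Nat.pow_le_pow_right (by omega) ha
      rw [Nat.pow_succ]; omega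

theorem calcRLoop_eq (k : Int) : ∀ (f : Nat) (r R : Int), r ≤ R →
    ¬(2 ^ R.toNat < k + R + 1) →
    (∀ r', r ≤ r' → r' < R → 2 ^ r'.toNat < k + r' + 1) →
    R - r ≤ (f : Int) → calcRLoop k f r = R := by
  intro f
  induction f with
  | zero =>
    intro r R h1 _ _ h4
    have : r = R := by push_cast at h4; omega
    simp [calcRLoop, this]
  | succ f ih =>
    intro r R h1 h2 h3 h4
    rw [calcRLoop]
    split
    · rename_i ht
      have hrR : r < R := by
        rcases eq_or_lt_of_le h1 with h | h
        · subst h; exact absurd ht h2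
        · exact h
      exact ih (r + 1) R (by omega) h2 (fun r' hr' => h3 r' (by omega)) (by push_cast at h4 ⊢; omega)
    · rename_i ht
      rcases eq_or_lt_of_le h1 with h | h
      · exact h
      · exact absurd (h3 r le_rfl h) ht

-- under Pre_, calc_r returns the r with 2^r = k + r + 1 exactly
theorem calc_r_exact (k : Int) (hk : 0 ≤ k) (m : Nat) (hm : (m : Int) ≤ k + 1)
    (h2 : (2 ^ m : Int) = k + m + 1) :
    1 ≤ calc_r_for_k k ∧ (2 ^ (calc_r_for_k k).toNat : Int) = k + calc_r_for_k k + 1 := by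
  set M : Nat := max m 1 with hM
  have hM1 : 1 ≤ M := le_max_right _ _
  have h2M : (2 ^ M : Int) = k + M + 1 := by
    rcases Nat.eq_zero_or_pos m with hm0 | hm1
    · subst hm0
      have hk0 : k = 0 := by norm_num at h2; omega
      subst hk0
      norm_num [hM]
    · have : M = m := by omega
      rw [this]; exact h2
  have hMk : (M : Int) ≤ k + 1 := by
    rcases Nat.eq_zero_or_pos m with hm0 | hm1
    · subst hm0
      have hk0 : k = 0 := by norm_num at h2; omega
      simp [hM, hk0]
    · have : M = m := by omega
      rw [this]; exact hm
  have hmin : ∀ r' : Int, 1 ≤ r' → r' < (M : Int) → 2 ^ r'.toNat < k + r' + 1 := by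
    intro r' h1 h2'
    set a := r'.toNat with ha
    have ha1 : 1 ≤ a := by omega
    have haM : a < M := by omega
    have := pow_sub_mono M a ha1 haM
    have hcast : (2 ^ a : Int) + M < 2 ^ M + a := by exact_mod_cast this
    have hr' : (a : Int) = r' := by omega
    omega
  have heq : calc_r_for_k k = (M : Int) := by
    apply calcRLoop_eq k (k.toNat + 1) 1 (M : Int) (by exact_mod_cast hM1)
    · rw [Int.toNat_natCast]; omega
    · exact fun r' h1 h2' => hmin r' h1 h2'
    · push_cast; omega
  rw [heq, Int.toNat_natCast]
  constructor
  · exact_mod_cast hM1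
  · exact h2M

-- ===== VERDICT (by name: the statement is the Claim_ definition above) =====
theorem insert_parity_positions_spec : Claim_equal_insert_parity_positions := by
  intro data _ hpre
  obtain ⟨m, hm1, hm2⟩ := hpre
  unfold Spec_insert_parity_positions insert_parity_positions insert_parity_positions_alt
  dsimp only
  set k : Int := (data.length : Int) with hk
  set r : Int := calc_r_for_k k with hr
  have hk0 : 0 ≤ k := by positivity
  obtain ⟨h1r, h2r⟩ := calc_r_exact k hk0 m (by rw [hk]; exact_mod_cast hm1)
    (by rw [hk]; exact_mod_cast hm2)
  rw [← hr] at h1r h2r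
  set R : Nat := r.toNat with hR
  have hrR : (R : Int) = r := by omega
  have hlen : data.length + R + 1 = 2 ^ R := by
    have : ((2 ^ R : Nat) : Int) = k + r + 1 := by push_cast; exact h2r
    omega
  congr 1
  have hsim := blockSim data R hlen R 0 [] 0 (by omega) rfl rfl
  simp only [pow_zero, Nat.add_sub_cancel, List.nil_append, Nat.cast_zero] at hsim
  have hN : k + r + 1 = (2:Int) ^ R := by rw [← h2r]
  rw [hN]
  have hnN : ((2:Int) ^ R).toNat = 2 ^ R := by
    have : ((2 ^ R : Nat) : Int) = (2:Int) ^ R := by push_cast; ring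
    omega
  rw [hnN, ← hrR]
  exact hsim
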